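-- pv_equiv track=rewrite | github.com/zeng-pin/Python-learn | pythonProject/0717_learn02/def return.py | get_sum
-- ===== SOURCE A (Python) =====
-- def get_sum(num):#返回多个值的函数
--     s=0
--     odd_sum=0
--     even_sum=0
--     for i in range(1,num+1):
--         s+=i
--         if i%2==0:even_sum+=i
--         else:odd_sum+=i
--
--     return odd_sum,even_sum,s
-- ===== SOURCE B (Python) =====
-- def get_sum(num):  # closed-form arithmetic-series version (O(1) instead of O(n))
--     n = num if num > 0 else 0
--     k = (n + 1) // 2       # count of odd numbers in 1..n
--     m = n // 2             # count of even numbers in 1..n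
--     return k * k, m * (m + 1), n * (n + 1) // 2
-- ===== Notes on version B (the rewrite author's own statement) =====
-- stated objective: faster
-- what changed: Replaced the O(n) accumulation loop over range(1,num+1) by the closed-form arithmetic-series formulas k^2, m(m+1) and n(n+1)/2.
import Mathlib
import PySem

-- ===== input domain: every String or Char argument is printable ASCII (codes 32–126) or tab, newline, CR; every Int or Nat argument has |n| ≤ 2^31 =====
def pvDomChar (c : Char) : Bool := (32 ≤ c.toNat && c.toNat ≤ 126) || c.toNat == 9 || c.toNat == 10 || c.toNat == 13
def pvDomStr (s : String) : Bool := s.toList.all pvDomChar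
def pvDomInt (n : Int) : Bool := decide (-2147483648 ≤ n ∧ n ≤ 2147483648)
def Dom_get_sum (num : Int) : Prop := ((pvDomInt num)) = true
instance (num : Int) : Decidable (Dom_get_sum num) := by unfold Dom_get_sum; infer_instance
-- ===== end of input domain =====

-- B replaces A's O(n) accumulation loop by closed-form arithmetic-series formulas (objective: faster, asymptotic).


-- ===== PORT A =====
-- state (odd_sum, even_sum, s); loop over range(1, num+1)
def get_sumStep (acc : Int × Int × Int) (i : Int) : Int × Int × Int :=
  let s := acc.2.2 + i
  if PySem.Int.mod i 2 = 0 then (acc.1, acc.2.1 + i, s) else (acc.1 + i, acc.2.1, s)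

def get_sum (num : Int) : List Int :=
  let st := (PySem.List.pyRange 1 (num + 1) 1).foldl get_sumStep (0, 0, 0)
  [st.1, st.2.1, st.2.2]

-- ===== PORT B =====
def get_sum_alt (num : Int) : List Int :=
  let n := if num > 0 then num else 0
  let k := PySem.Int.floordiv (n + 1) 2
  let m := PySem.Int.floordiv n 2
  [k * k, m * (m + 1), PySem.Int.floordiv (n * (n + 1)) 2]

-- ===== PRECONDITION & SPEC =====
def Spec_get_sum (num : Int) (out : List Int) : Prop := out = get_sum_alt num
instance (num : Int) (out : List Int) : Decidable (Spec_get_sum num out) := by unfold Spec_get_sum; infer_instance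

-- ===== CLAIM (what is proved, stated in full; the proofs are below) =====
def Claim_equal_get_sum : Prop := ∀ (num : Int), Dom_get_sum num → Spec_get_sum num (get_sum num)

-- ===== LEMMAS AND PROOFS =====

-- Closed forms over Nat for the fold over range(1, n+1)
lemma get_sum_fold_closed (n : Nat) :
    (PySem.List.pyRange 1 ((n : Int) + 1) 1).foldl get_sumStep (0, 0, 0) =
      ((((n + 1) / 2 : Nat) * ((n + 1) / 2 : Nat) : Int),
       (((n / 2 : Nat) * (n / 2 + 1 : Nat) : Int),
        ((n * (n + 1) / 2 : Nat) : Int))) := by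
  induction n with
  | zero => decide
  | succ m ih =>
    have h : PySem.List.pyRange 1 (((m + 1 : Nat) : Int) + 1) 1
        = PySem.List.pyRange 1 ((m : Int) + 1) 1 ++ [((m : Int) + 1)] := by
      have := PySem.List.pyRange_one_succ_right (a := 1) (b := (m : Int) + 1) (by omega)
      push_cast
      convert this using 2
    rw [h, List.foldl_append, ih]
    simp only [List.foldl, get_sumStep]
    rcases Nat.even_or_odd (m + 1) with he | ho
    · -- m + 1 even: m = 2*j + 1
      obtain ⟨k, hk⟩ := he
      obtain ⟨j, rfl⟩ : ∃ j, m = 2 * j + 1 := ⟨k - 1, by omega⟩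
      have hmod : PySem.Int.mod (((2 * j + 1 : Nat) : Int) + 1) 2 = 0 := by
        rw [PySem.Int.mod_eq_zero_iff_dvd]
        exact ⟨(j : Int) + 1, by push_cast; ring⟩
      simp only [hmod, if_true]
      have e0 : (2 * j + 1 + 1 + 1) / 2 = j + 1 := by omega
      have e1 : (2 * j + 1 + 1) / 2 = j + 1 := by omega
      have e2 : (2 * j + 1) / 2 = j := by omega
      have e3 : (2 * j + 1) * (2 * j + 1 + 1) / 2 = (2 * j + 1) * (j + 1) := by
        rw [show (2 * j + 1) * (2 * j + 1 + 1) = 2 * ((2 * j + 1) * (j + 1)) from by ring]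
        omega
      have e4 : (2 * j + 1 + 1) * (2 * j + 1 + 1 + 1) / 2 = (j + 1) * (2 * j + 3) := by
        rw [show (2 * j + 1 + 1) * (2 * j + 1 + 1 + 1) = 2 * ((j + 1) * (2 * j + 3)) from by ring]
        omega
      refine Prod.ext ?_ (Prod.ext ?_ ?_) <;>
        simp only [e0, e1, e2, e3, e4] <;> push_cast <;> ring
    · -- m + 1 odd: m = 2*j
      obtain ⟨k, hk⟩ := ho
      obtain ⟨j, rfl⟩ : ∃ j, m = 2 * j := ⟨k, by omega⟩
      have hmod : ¬ PySem.Int.mod (((2 * j : Nat) : Int) + 1) 2 = 0 := by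
        rw [PySem.Int.mod_eq_zero_iff_dvd]
        rintro ⟨c, hc⟩
        omega
      simp only [hmod, if_false]
      have e1 : (2 * j + 1) / 2 = j := by omega
      have e2 : (2 * j + 1 + 1) / 2 = j + 1 := by omega
      have e3 : (2 * j) / 2 = j := by omega
      have e4 : (2 * j) * (2 * j + 1) / 2 = j * (2 * j + 1) := by
        rw [show (2 * j) * (2 * j + 1) = 2 * (j * (2 * j + 1)) from by ring]
        omega
      have e5 : (2 * j + 1) * (2 * j + 1 + 1) / 2 = (2 * j + 1) * (j + 1) := by
        rw [show (2 * j + 1) * (2 * j + 1 + 1) = 2 * ((2 * j + 1) * (j + 1)) from by ring]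
        omega
      refine Prod.ext ?_ (Prod.ext ?_ ?_) <;>
        simp only [e1, e2, e3, e4, e5] <;> push_cast <;> ring

lemma get_sum_eq_alt (num : Int) : get_sum num = get_sum_alt num := by
  by_cases hle : num ≤ 0
  · have hr : PySem.List.pyRange 1 (num + 1) 1 = [] :=
      PySem.List.pyRange_one_eq_nil (by omega)
    simp [get_sum, get_sum_alt, hr, if_neg (not_lt.mpr hle)]
  · have hpos : 0 < num := by omega
    obtain ⟨n, rfl⟩ : ∃ n : Nat, num = (n : Int) :=
      ⟨num.toNat, (Int.toNat_of_nonneg (le_of_lt hpos)).symm⟩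
    simp only [get_sum, get_sum_alt, get_sum_fold_closed n, if_pos hpos]
    have h1 : PySem.Int.floordiv ((n : Int) + 1) 2 = (((n + 1) / 2 : Nat) : Int) := by
      exact_mod_cast PySem.Int.floordiv_natCast (n + 1) 2
    have h2 : PySem.Int.floordiv (n : Int) 2 = ((n / 2 : Nat) : Int) :=
      PySem.Int.floordiv_natCast n 2
    have h3 : PySem.Int.floordiv ((n : Int) * ((n : Int) + 1)) 2 = ((n * (n + 1) / 2 : Nat) : Int) := by
      exact_mod_cast PySem.Int.floordiv_natCast (n * (n + 1)) 2
    rw [h1, h2, h3]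
    push_cast
    ring_nf

-- ===== VERDICT (by name: the statement is the Claim_ definition above) =====
theorem get_sum_spec : Claim_equal_get_sum := by
  intro num _
  unfold Spec_get_sum
  exact get_sum_eq_alt num
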